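-- pv_equiv track=rewrite | github.com/mdforti/nomad | nomad/files.py | raw_path_is_well_formed
-- ===== SOURCE A (Python) =====
-- def raw_path_is_well_formed(path: str) -> bool:
--     '''
--     Checks if a path is a well formed "raw path". These paths are relative to the
--     raw file directory of an upload. All methods that expect raw path arguments should
--     use this method to validate the well-formedness of the path.
--
--     We only allow very simple paths to be used as raw paths. They may not start with
--     '/' or contain '//' or '.' or '..' elements, for security reasons. They may end
--     with a single '/', indicating that a folder is referred. For referring to the raw
--     "root folder" itself, the empty string should be used, not '.' etc.
--     '''
--     if type(path) != str:
--         return False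
--     if path == '':
--         return True
--     if path.startswith('/') or '//' in path:
--         return False
--     for element in path.split('/'):
--         if element == '.' or element == '..':
--             return False
--     return True
-- ===== SOURCE B (Python) =====
-- def raw_path_is_well_formed(path: str) -> bool:
--     # Character-level finite automaton; no split(), no substring search, O(1) extra space.
--     # State classifies the characters seen since the last '/':
--     # 0 = empty, 1 = '.', 2 = '..', 3 = anything else (a legal segment).
--     if type(path) != str:
--         return False
--     state = 0
--     for ch in path:
--         if ch == '/':
--             if state != 3:
--                 return False
--             state = 0
--         elif ch == '.':
--             if state == 0:
--                 state = 1
--             elif state == 1: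
--                 state = 2
--             else:
--                 state = 3
--         else:
--             state = 3
--     return state != 1 and state != 2
-- ===== Notes on version B (the rewrite author's own statement) =====
-- stated objective: alternative
-- what changed: B replaces A's split-based element loop plus prefix and double-slash substring scans with a single character-level four-state finite automaton (segment so far: empty, dot, dot-dot, other) that reads the path once in constant extra space.
import Mathlib
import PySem

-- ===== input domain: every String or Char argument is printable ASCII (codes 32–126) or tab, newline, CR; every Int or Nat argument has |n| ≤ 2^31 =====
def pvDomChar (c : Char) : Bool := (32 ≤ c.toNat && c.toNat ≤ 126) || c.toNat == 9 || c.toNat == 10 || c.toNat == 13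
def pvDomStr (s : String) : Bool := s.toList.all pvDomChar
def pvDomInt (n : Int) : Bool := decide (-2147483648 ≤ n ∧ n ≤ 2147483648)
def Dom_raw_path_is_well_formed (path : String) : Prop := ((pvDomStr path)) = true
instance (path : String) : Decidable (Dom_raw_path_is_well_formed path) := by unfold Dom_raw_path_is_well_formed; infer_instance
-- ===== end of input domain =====

-- B replaces A's split + startswith/'//' substring checks with a single character-level
-- four-state automaton (segment-so-far is empty / '.' / '..' / other); same values, different algorithm.


-- ===== PORT A =====
-- literal transliteration of A (the `for element in path.split('/')` early-return loop is `List.all`)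
def raw_path_is_well_formed (path : String) : Bool :=
  let l := path.toList
  if l == [] then true
  else if PySem.Chars.startswith l ['/'] || PySem.Chars.isIn ['/', '/'] l then false
  else (PySem.Chars.splitOn l ['/']).all (fun e => !(e == ['.'] || e == ['.', '.']))

-- ===== PORT B =====
-- Source B's `for ch in path` automaton loop with early return on '/' at a non-OTHER state;
-- state 0 = empty, 1 = '.', 2 = '..', 3 = other
def altGo : List Char → Int → Bool
  | [], state => !(state == 1) && !(state == 2)
  | ch :: rest, state =>
    if ch = '/' then
      if !(state == 3) then false else altGo rest 0
    else if ch = '.' then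
      altGo rest (if state == 0 then 1 else if state == 1 then 2 else 3)
    else altGo rest 3

def raw_path_is_well_formed_alt (path : String) : Bool := altGo path.toList 0

-- ===== PRECONDITION & SPEC =====
def Spec_raw_path_is_well_formed (path : String) (out : Bool) : Prop := out = raw_path_is_well_formed_alt path
instance (path : String) (out : Bool) : Decidable (Spec_raw_path_is_well_formed path out) := by unfold Spec_raw_path_is_well_formed; infer_instance

-- ===== CLAIM (what is proved, stated in full; the proofs are below) =====
def Claim_equal_raw_path_is_well_formed : Prop := ∀ (path : String), Dom_raw_path_is_well_formed path → Spec_raw_path_is_well_formed path (raw_path_is_well_formed path)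

-- ===== LEMMAS AND PROOFS =====

-- structural single-char split, the proofs' reference model of split('/')
def mySplit : List Char → List (List Char)
  | [] => [[]]
  | c :: rest => if c = '/' then [] :: mySplit rest else (mySplit rest).modifyHead (c :: ·)

-- some element is empty at a non-last position
def hasENL : List (List Char) → Bool
  | [] => false
  | [_] => false
  | e :: rest => (e == []) || hasENL rest

-- some element is empty at a position that is neither first nor last
def interiorE : List (List Char) → Bool
  | [] => false
  | _ :: rest => hasENL rest

-- the automaton's non-'/' transition, and its run over a full segment
def nstep (s : Int) (c : Char) : Int :=
  if c = '.' then (if s == 0 then 1 else if s == 1 then 2 else 3) else 3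

def extend (s : Int) (e : List Char) : Int := e.foldl nstep s

-- classification of a whole slash-free segment
def stOf (e : List Char) : Int :=
  if e = [] then 0 else if e = ['.'] then 1 else if e = ['.', '.'] then 2 else 3

-- what altGo computes, expressed on the list of segments
def chkFrom : Int → List (List Char) → Bool
  | _, [] => true
  | s, [e] => !(extend s e == 1) && !(extend s e == 2)
  | s, e :: es => (extend s e == 3) && chkFrom 0 es

theorem hasENL_one (e : List Char) : hasENL [e] = false := rfl
theorem hasENL_cons2 (e f : List Char) (fs : List (List Char)) :
    hasENL (e :: f :: fs) = ((e == []) || hasENL (f :: fs)) := rfl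

theorem mySplit_ne_nil (l : List Char) : mySplit l ≠ [] := by
  induction l with
  | nil => simp [mySplit]
  | cons c rest ih =>
    simp only [mySplit]
    split
    · simp
    · cases h : mySplit rest with
      | nil => exact absurd h ih
      | cons e es => simp

theorem go_spec (fuel : Nat) (l cur : List Char) (acc : List (List Char))
    (h : l.length < fuel) :
    PySem.Chars.splitOn.go ['/'] fuel l cur acc
      = acc.reverse ++ (mySplit l).modifyHead (cur.reverse ++ ·) := by
  induction fuel generalizing l cur acc with
  | zero => omega
  | succ fuel ih =>
    cases l with
    | nil => simp [PySem.Chars.splitOn.go, mySplit]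
    | cons c rest =>
      by_cases hc : c = '/'
      · subst hc
        have hpre : List.isPrefixOf ['/'] ('/' :: rest) = true := by
          simp [List.isPrefixOf]
        rw [PySem.Chars.splitOn.go]
        simp only [hpre, if_pos]
        have hdrop : List.drop ['/'].length ('/' :: rest) = rest := rfl
        rw [hdrop, ih rest [] (cur.reverse :: acc) (by simpa using Nat.lt_of_succ_lt_succ h)]
        simp [mySplit]
        cases mySplit rest <;> simp [List.modifyHead]
      · have hpre : List.isPrefixOf ['/'] (c :: rest) = false := by
          simp [List.isPrefixOf]
          intro h'; exact absurd h'.symm hc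
        rw [PySem.Chars.splitOn.go]
        simp only [hpre]
        rw [if_neg (by simp)]
        rw [ih rest (c :: cur) acc (by simpa using Nat.lt_of_succ_lt_succ h)]
        obtain ⟨e, es, he⟩ := List.exists_cons_of_ne_nil (mySplit_ne_nil rest)
        simp [mySplit, hc, he]

theorem splitOn_eq (l : List Char) : PySem.Chars.splitOn l ['/'] = mySplit l := by
  rw [PySem.Chars.splitOn, go_spec _ _ _ _ (by omega)]
  obtain ⟨e, es, he⟩ := List.exists_cons_of_ne_nil (mySplit_ne_nil l)
  simp [he]

theorem headI_mySplit_empty (c : Char) (rest : List Char) :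
    ((mySplit (c :: rest)).headI == ([] : List Char)) = decide (c = '/') := by
  by_cases hc : c = '/'
  · simp [mySplit, hc]
  · obtain ⟨e, es, he⟩ := List.exists_cons_of_ne_nil (mySplit_ne_nil rest)
    simp [mySplit, hc, he]

theorem startswith_cons (c : Char) (rest : List Char) :
    PySem.Chars.startswith (c :: rest) ['/'] = decide (c = '/') := by
  by_cases hc : c = '/'
  · subst hc
    have hp : ('/' : Char) :: ([] : List Char) <+: ('/' :: rest) := ⟨rest, rfl⟩
    simp [(PySem.Chars.startswith_iff _ _).mpr hp]
  · simp only [hc, decide_false]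
    rw [← Bool.not_eq_true, PySem.Chars.startswith_iff]
    intro hpre
    rcases List.cons_prefix_cons.mp hpre with ⟨h1, _⟩
    exact hc h1.symm

theorem startswith_singleton_split (rest : List Char) (e : List Char)
    (h : mySplit rest = [e]) : PySem.Chars.startswith rest ['/'] = false := by
  cases rest with
  | nil => rw [← Bool.not_eq_true, PySem.Chars.startswith_iff]; intro hp; simpa using hp.length_le
  | cons c r =>
    rw [startswith_cons]
    by_cases hc : c = '/'
    · exfalso
      obtain ⟨f, fs, hf⟩ := List.exists_cons_of_ne_nil (mySplit_ne_nil r)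
      rw [mySplit, if_pos hc, hf] at h
      simp at h
    · simp [hc]

theorem isIn_cons_ne (c : Char) (rest : List Char) (hc : c ≠ '/') :
    PySem.Chars.isIn ['/', '/'] (c :: rest) = PySem.Chars.isIn ['/', '/'] rest := by
  rw [Bool.eq_iff_iff, PySem.Chars.isIn_iff_infix, PySem.Chars.isIn_iff_infix]
  constructor
  · intro h
    rcases List.infix_cons_iff.mp h with h | h
    · rcases List.cons_prefix_cons.mp h with ⟨h1, _⟩
      exact absurd h1.symm hc
    · exact h
  · exact fun h => List.infix_cons_iff.mpr (Or.inr h)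

theorem isIn_cons_slash (rest : List Char) :
    PySem.Chars.isIn ['/', '/'] ('/' :: rest)
      = (PySem.Chars.startswith rest ['/'] || PySem.Chars.isIn ['/', '/'] rest) := by
  rw [Bool.eq_iff_iff, PySem.Chars.isIn_iff_infix]
  simp only [Bool.or_eq_true, PySem.Chars.isIn_iff_infix, PySem.Chars.startswith_iff]
  constructor
  · intro h
    rcases List.infix_cons_iff.mp h with h | h
    · rcases List.cons_prefix_cons.mp h with ⟨_, h2⟩
      exact Or.inl h2
    · exact Or.inr h
  · rintro (h | h)
    · exact List.infix_cons_iff.mpr (Or.inl (List.cons_prefix_cons.mpr ⟨rfl, h⟩))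
    · exact List.infix_cons_iff.mpr (Or.inr h)

theorem isIn_eq_interiorE (l : List Char) :
    PySem.Chars.isIn ['/', '/'] l = interiorE (mySplit l) := by
  induction l with
  | nil => decide
  | cons c rest ih =>
    by_cases hc : c = '/'
    · subst hc
      rw [isIn_cons_slash, mySplit, if_pos rfl]
      obtain ⟨e, es, he⟩ := List.exists_cons_of_ne_nil (mySplit_ne_nil rest)
      rw [he] at ih ⊢
      simp only [interiorE]
      cases es with
      | nil =>
        rw [startswith_singleton_split rest e he]
        simpa [interiorE, hasENL] using ih
      | cons f fs =>
        have hsw : PySem.Chars.startswith rest ['/'] = (e == ([] : List Char)) := by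
          cases rest with
          | nil => rw [mySplit] at he; simp at he
          | cons c' r' => rw [startswith_cons, ← headI_mySplit_empty c' r', he]; rfl
        simp only [interiorE] at ih
        rw [hasENL_cons2, hsw, ih]
    · rw [isIn_cons_ne c rest hc, mySplit, if_neg hc]
      obtain ⟨e, es, he⟩ := List.exists_cons_of_ne_nil (mySplit_ne_nil rest)
      rw [he] at ih ⊢
      simp only [interiorE, List.modifyHead] at ih ⊢
      exact ih

theorem aBad_eq_hasENL (l : List Char) :
    (PySem.Chars.startswith l ['/'] || PySem.Chars.isIn ['/', '/'] l) = hasENL (mySplit l) := by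
  cases l with
  | nil => decide
  | cons c rest =>
    rw [startswith_cons, isIn_eq_interiorE]
    by_cases hc : c = '/'
    · subst hc
      rw [mySplit, if_pos rfl]
      obtain ⟨e, es, he⟩ := List.exists_cons_of_ne_nil (mySplit_ne_nil rest)
      simp [he, hasENL]
    · rw [mySplit, if_neg hc]
      obtain ⟨e, es, he⟩ := List.exists_cons_of_ne_nil (mySplit_ne_nil rest)
      rw [he]
      simp only [List.modifyHead, interiorE, hc, decide_false, Bool.false_or]
      cases es with
      | nil => simp [hasENL]
      | cons f fs => simp [hasENL]

-- ===== B-side lemmas: altGo via the segment automaton =====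

theorem nstep_three (c : Char) : nstep 3 c = 3 := by
  by_cases hc : c = '.' <;> simp [nstep, hc]

theorem extend_three (e : List Char) : extend 3 e = 3 := by
  induction e with
  | nil => rfl
  | cons c cs ih => simp only [extend, List.foldl_cons, nstep_three]; exact ih

theorem extend_zero (e : List Char) : extend 0 e = stOf e := by
  match e with
  | [] => rfl
  | [c] =>
    by_cases hc : c = '.' <;> simp [extend, nstep, stOf, hc]
  | [c, d] =>
    by_cases hc : c = '.' <;> by_cases hd : d = '.' <;>
      simp [extend, nstep, stOf, hc, hd]
  | c :: d :: f :: rest =>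
    have h3 : nstep (nstep (nstep 0 c) d) f = 3 := by
      by_cases hc : c = '.' <;> by_cases hd : d = '.' <;> by_cases hf : f = '.' <;>
        simp [nstep, hc, hd, hf]
    have : extend 0 (c :: d :: f :: rest) = extend 3 rest := by
      simp only [extend, List.foldl_cons, h3]
    rw [this, extend_three]
    simp [stOf]

theorem altGo_chkFrom (l : List Char) : ∀ s, altGo l s = chkFrom s (mySplit l) := by
  induction l with
  | nil => intro s; rfl
  | cons c rest ih =>
    intro s
    by_cases hc : c = '/'
    · subst hc
      obtain ⟨e, es, he⟩ := List.exists_cons_of_ne_nil (mySplit_ne_nil rest)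
      rw [mySplit, if_pos rfl, he]
      show (if !(s == 3) then false else altGo rest 0) = chkFrom s ([] :: e :: es)
      have hext : extend s [] = s := rfl
      rw [ih 0, he]
      cases h3 : (s == 3) <;> simp [chkFrom, hext, h3]
    · obtain ⟨e, es, he⟩ := List.exists_cons_of_ne_nil (mySplit_ne_nil rest)
      rw [mySplit, if_neg hc, he]
      have hstep : altGo (c :: rest) s = altGo rest (nstep s c) := by
        by_cases hd : c = '.' <;> simp [altGo, nstep, hc, hd]
      rw [hstep, ih (nstep s c), he]
      have hext : ∀ g : List Char, extend s (c :: g) = extend (nstep s c) g := fun g => rfl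
      cases es <;> simp [chkFrom, List.modifyHead, hext]

theorem stOf_eq_one (e : List Char) : (stOf e == 1) = (e == ['.']) := by
  unfold stOf
  split_ifs with h1 h2 h3 <;> simp_all

theorem stOf_eq_two (e : List Char) : (stOf e == 2) = (e == ['.', '.']) := by
  unfold stOf
  split_ifs with h1 h2 h3 <;> simp_all

theorem stOf_eq_three (e : List Char) :
    (stOf e == 3) = (!(e == []) && !(e == ['.']) && !(e == ['.', '.'])) := by
  unfold stOf
  split_ifs with h1 h2 h3 <;> simp_all

theorem chkFrom_zero (es : List (List Char)) (hne : es ≠ []) :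
    chkFrom 0 es = ((es.all (fun e => !(e == ['.'] || e == ['.', '.']))) && !hasENL es) := by
  induction es with
  | nil => exact absurd rfl hne
  | cons e rest ih =>
    cases rest with
    | nil =>
      show (!(extend 0 e == 1) && !(extend 0 e == 2)) = _
      rw [extend_zero, stOf_eq_one, stOf_eq_two, hasENL_one]
      simp
    | cons f fs =>
      show ((extend 0 e == 3) && chkFrom 0 (f :: fs)) = _
      rw [extend_zero, stOf_eq_three, ih (by simp), hasENL_cons2]
      cases h0 : (e == ([] : List Char)) <;>
        cases h1 : (e == ['.']) <;>
        cases h2 : (e == ['.', '.']) <;>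
        cases hA : ((f :: fs).all (fun e => !(e == ['.'] || e == ['.', '.']))) <;>
        cases hH : hasENL (f :: fs) <;> simp_all

-- ===== VERDICT (by name: the statement is the Claim_ definition above) =====
theorem raw_path_is_well_formed_spec : Claim_equal_raw_path_is_well_formed := by
  intro path _
  unfold Spec_raw_path_is_well_formed raw_path_is_well_formed raw_path_is_well_formed_alt
  rw [altGo_chkFrom, chkFrom_zero _ (mySplit_ne_nil _)]
  simp only [splitOn_eq]
  cases hl : path.toList with
  | nil => decide
  | cons c rest =>
    rw [if_neg (by simp)]
    rw [aBad_eq_hasENL]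
    cases hH : hasENL (mySplit (c :: rest)) <;> simp
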